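-- pv_equiv track=rewrite | github.com/INF1007-2022A/chapitre-03-2-emiliedesgeorges | exercice.py | format_base
-- ===== SOURCE A (Python) =====
-- def format_base(value, base, digit_letters):
-- 	# Formater un nombre dans une base donné en utilisant les lettres fournies pour les chiffres<
-- 	# `digits_letters[0]` Nous donne la lettre pour le chiffre 0, ainsi de suite.
-- 	result = ""
-- 	abs_value = abs(value)
-- 	while abs_value != 0:
-- 		smallest_digit = abs_value % 10
-- 		result += digit_letters[smallest_digit]
-- 		abs_value = abs_value // 10 #??ici base non, pas 10??
--
-- 	if value < 0:
-- 		# TODO: Ne pas oublier d'ajouter '-' devant pour les nombres négatifs.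
-- 	    result = result + "-"
-- 	result = result[::-1] #??pourquoi affiche une erreur d'indentation??
-- 	return result
-- ===== SOURCE B (Python) =====
-- def format_base(value, base, digit_letters):
--     # Positional algorithm: find the power of ten just above |value|, then read
--     # digits most-significant-first via integer division; '-' prefixed if negative.
--     # (Divides by 10, like A: A's `base` parameter is unused.)
--     n = abs(value)
--     p = 1
--     while p <= n:
--         p *= 10
--     out = []
--     while p > 1:
--         p //= 10
--         out.append(digit_letters[(n // p) % 10])
--     s = "".join(out)
--     return "-" + s if value < 0 else s
-- ===== Notes on version B (the rewrite author's own statement) =====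
-- stated objective: alternative
-- what changed: Replaces A's least-significant-first accumulation loop + trailing '-' + full string reversal with a positional algorithm: first find the power of ten just above |value|, then emit digits most-significant-first by integer division, prepending '-' for negatives; no reversal.
import Mathlib
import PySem

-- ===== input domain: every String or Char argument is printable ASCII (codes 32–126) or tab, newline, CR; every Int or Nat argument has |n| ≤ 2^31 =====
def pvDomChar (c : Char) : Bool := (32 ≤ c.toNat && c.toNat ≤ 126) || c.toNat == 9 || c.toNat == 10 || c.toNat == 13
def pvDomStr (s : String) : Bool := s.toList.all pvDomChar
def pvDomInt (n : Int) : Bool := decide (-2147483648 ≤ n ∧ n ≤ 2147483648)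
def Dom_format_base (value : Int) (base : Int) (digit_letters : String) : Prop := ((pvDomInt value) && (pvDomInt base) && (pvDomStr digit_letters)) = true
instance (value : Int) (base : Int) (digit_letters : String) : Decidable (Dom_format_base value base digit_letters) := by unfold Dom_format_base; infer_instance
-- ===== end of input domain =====

-- B replaces A's least-significant-first loop + trailing '-' + full reversal with a
-- positional algorithm (find the power of ten above |value|, then emit digits
-- most-significant-first by division); objective: alternative.

-- ===== PORT A =====
-- A's while-loop: state (result, abs_value); result += digit_letters[abs_value % 10]; abs_value //= 10.
-- Out-of-range index (Python IndexError) is excluded by Pre_; .getD ' ' there is never reached inside Pre_.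
def fbLoopA (result : List Char) (n : Nat) (letters : List Char) : List Char :=
  if n = 0 then result
  else fbLoopA (result ++ [(PySem.Chars.pyGet? letters ((n % 10 : Nat) : Int)).getD ' ']) (n / 10) letters
decreasing_by exact Nat.div_lt_self (Nat.pos_of_ne_zero (by assumption)) (by omega)

def format_base (value : Int) (base : Int) (digit_letters : String) : String :=
  let r := fbLoopA [] value.natAbs digit_letters.toList
  let r2 := if value < 0 then r ++ ['-'] else r
  String.ofList r2.reverse  -- result[::-1]

-- ===== PORT B =====
-- B's first loop: p = 1; while p <= n: p *= 10.  (The 0 < p conjunct is a pure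
-- totality guard — p starts at 1 and only grows, so it always holds.)
def fbPow (p n : Nat) : Nat :=
  if h : p ≤ n ∧ 0 < p then fbPow (p * 10) n else p
termination_by n + 1 - p
decreasing_by
  have hp : p < p * 10 := (Nat.lt_mul_iff_one_lt_right h.2).mpr (by omega)
  omega

-- B's second loop: while p > 1: p //= 10; out.append(digit_letters[(n // p) % 10]).
def fbEmit (out : List Char) (p n : Nat) (letters : List Char) : List Char :=
  if h : 1 < p then
    fbEmit (out ++ [(PySem.Chars.pyGet? letters (((n / (p / 10)) % 10 : Nat) : Int)).getD ' ']) (p / 10) n letters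
  else out
decreasing_by exact Nat.div_lt_self (by omega) (by omega)

def format_base_alt (value : Int) (base : Int) (digit_letters : String) : String :=
  let n := value.natAbs
  let p := fbPow 1 n
  let out := fbEmit [] p n digit_letters.toList
  let s := String.ofList out
  if value < 0 then "-" ++ s else s

-- ===== PRECONDITION & SPEC =====
-- Pre_: every decimal digit of |value| indexes inside digit_letters (otherwise A raises IndexError).
def Pre_format_base (value : Int) (base : Int) (digit_letters : String) : Prop :=
  ∀ d ∈ Nat.digits 10 value.natAbs, d < digit_letters.toList.length
instance (value : Int) (base : Int) (digit_letters : String) : Decidable (Pre_format_base value base digit_letters) := by unfold Pre_format_base; infer_instance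

def pvWitness_format_base : Int × Int × String := (-305, 7, "0123456789")

def Spec_format_base (value : Int) (base : Int) (digit_letters : String) (out : String) : Prop := out = format_base_alt value base digit_letters
instance (value : Int) (base : Int) (digit_letters : String) (out : String) : Decidable (Spec_format_base value base digit_letters out) := by unfold Spec_format_base; infer_instance

-- ===== CLAIM (what is proved, stated in full; the proofs are below) =====
def Claim_equal_format_base : Prop := ∀ (value : Int) (base : Int) (digit_letters : String), Dom_format_base value base digit_letters → Pre_format_base value base digit_letters → Spec_format_base value base digit_letters (format_base value base digit_letters)

-- ===== LEMMAS AND PROOFS =====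

-- digit i (from the right) of n, rendered through digit_letters
def fbDig (letters : List Char) (n i : Nat) : Char :=
  (PySem.Chars.pyGet? letters ((n / 10 ^ i % 10 : Nat) : Int)).getD ' '

theorem fbLoopA_acc (result : List Char) (n : Nat) (letters : List Char) :
    fbLoopA result n letters = result ++ fbLoopA [] n letters := by
  induction n using Nat.strong_induction_on generalizing result with
  | _ n ih =>
    by_cases h : n = 0
    · subst h; simp [fbLoopA]
    · conv_lhs => rw [fbLoopA]
      conv_rhs => rw [fbLoopA]
      simp only [if_neg h, List.nil_append]
      rw [ih (n / 10) (Nat.div_lt_self (Nat.pos_of_ne_zero h) (by omega)),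
          ih (n / 10) (Nat.div_lt_self (Nat.pos_of_ne_zero h) (by omega))
            ([(PySem.Chars.pyGet? letters ((n % 10 : Nat) : Int)).getD ' '])]
      simp

theorem fbEmit_acc (out : List Char) (p n : Nat) (letters : List Char) :
    fbEmit out p n letters = out ++ fbEmit [] p n letters := by
  induction p using Nat.strong_induction_on generalizing out with
  | _ p ih =>
    by_cases h : 1 < p
    · conv_lhs => rw [fbEmit]
      conv_rhs => rw [fbEmit]
      simp only [dif_pos h, List.nil_append]
      rw [ih (p / 10) (Nat.div_lt_self (by omega) (by omega)),
          ih (p / 10) (Nat.div_lt_self (by omega) (by omega))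
            ([(PySem.Chars.pyGet? letters (((n / (p / 10)) % 10 : Nat) : Int)).getD ' '])]
      simp
    · conv_lhs => rw [fbEmit]
      conv_rhs => rw [fbEmit]
      simp [h]

-- B's emit loop at p = 10^k produces exactly the k digits of n, most-significant first
theorem fbEmit_digits (k n : Nat) (letters : List Char) :
    fbEmit [] (10 ^ k) n letters = ((List.range k).reverse.map (fbDig letters n)) := by
  induction k with
  | zero => rw [fbEmit]; simp
  | succ k ih =>
    rw [fbEmit]
    have h1 : 1 < 10 ^ (k + 1) := by
      calc 1 < 10 := by omega
      _ ≤ 10 ^ (k + 1) := Nat.le_self_pow (by omega) 10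
    have h2 : 10 ^ (k + 1) / 10 = 10 ^ k := by
      rw [pow_succ]; exact Nat.mul_div_cancel _ (by omega)
    simp only [dif_pos h1, h2]
    rw [fbEmit_acc, ih]
    rw [List.range_succ, List.reverse_append]
    simp [fbDig]

-- peeling one digit off the most-significant-first digit list
theorem fbStep (letters : List Char) (m n : Nat) :
    List.map (fbDig letters n) (List.range (m + 1)).reverse
      = List.map (fbDig letters (n / 10)) (List.range m).reverse ++ [fbDig letters n 0] := by
  have hswap : (fbDig letters n) ∘ Nat.succ = fbDig letters (n / 10) := by
    funext i
    simp only [Function.comp]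
    unfold fbDig
    rw [Nat.div_div_eq_div_mul, ← pow_succ']
  rw [List.range_succ_eq_map, List.reverse_cons, List.map_append, List.map_reverse,
    List.map_map, hswap, List.map_cons, List.map_nil, List.map_reverse]

-- A's loop, reversed, also produces the digits of n most-significant first,
-- when 10^k ≤ n < 10^(k+1)
theorem fbLoopA_digits (k : Nat) (letters : List Char) : ∀ n : Nat, 10 ^ k ≤ n → n < 10 ^ (k + 1) →
    (fbLoopA [] n letters).reverse = ((List.range (k + 1)).reverse.map (fbDig letters n)) := by
  induction k with
  | zero =>
    intro n h1 h2
    norm_num at h1 h2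
    have hn : n ≠ 0 := by omega
    rw [fbLoopA]; simp only [if_neg hn]
    rw [fbLoopA_acc]
    have : n / 10 = 0 := Nat.div_eq_of_lt h2
    rw [this, fbLoopA]
    simp [fbDig]
  | succ k ih =>
    intro n h1 h2
    have hn : n ≠ 0 := by
      have : 0 < 10 ^ (k + 1) := Nat.pow_pos (by omega)
      omega
    rw [fbLoopA]; simp only [if_neg hn]
    rw [fbLoopA_acc, List.reverse_append]
    have hlo : 10 ^ k ≤ n / 10 := by
      rw [Nat.le_div_iff_mul_le (by omega)]
      rw [pow_succ] at h1; omega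
    have hhi : n / 10 < 10 ^ (k + 1) := by
      rw [Nat.div_lt_iff_lt_mul (by omega)]
      rw [pow_succ] at h2; omega
    rw [ih (n / 10) hlo hhi]
    have hd0 : (PySem.Chars.pyGet? letters ((n % 10 : Nat) : Int)).getD ' ' = fbDig letters n 0 := by
      unfold fbDig; norm_num
    simp only [List.reverse_cons, List.reverse_nil, List.nil_append]
    rw [hd0]
    exact (fbStep letters (k + 1) n).symm

-- fbPow 1 n returns 10^j with n < 10^j and (j = 0 or 10^(j-1) ≤ n)
theorem fbPow_spec : ∀ (p n : Nat), 0 < p →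
    ∃ j, fbPow p n = p * 10 ^ j ∧ n < p * 10 ^ j ∧ (j = 0 ∨ p * 10 ^ (j - 1) ≤ n) := by
  intro p n hp
  induction p using fbPow.induct n with
  | case1 p h ih =>
    obtain ⟨j', he, hlt, hor⟩ := ih (by omega)
    refine ⟨j' + 1, ?_, ?_, ?_⟩
    · rw [fbPow, dif_pos h, he]; ring
    · calc n < p * 10 * 10 ^ j' := hlt
        _ = p * 10 ^ (j' + 1) := by ring
    · right
      rcases hor with h0 | hle
      · subst h0; simpa using h.1
      · rcases j' with _ | m
        · simpa using h.1
        · have he1 : (m + 1 + 1 - 1) = m + 1 := rfl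
          rw [he1, pow_succ]
          calc p * (10 ^ m * 10) = p * 10 * 10 ^ m := by ring
            _ ≤ n := by simpa using hle
  | case2 p h =>
    refine ⟨0, ?_, ?_, Or.inl rfl⟩
    · rw [fbPow, dif_neg h]; simp
    · simp only [pow_zero, Nat.mul_one]
      omega

-- String concatenation bridge for the '-' sign
theorem ofList_dash (cs : List Char) : "-" ++ String.ofList cs = String.ofList ('-' :: cs) := by
  have h : ("-" ++ String.ofList cs).toList = (String.ofList ('-' :: cs)).toList := by simp
  exact String.toList_injective h

-- core: B's two loops equal A's loop reversed, for every n
theorem core_eq (n : Nat) (letters : List Char) :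
    fbEmit [] (fbPow 1 n) n letters = (fbLoopA [] n letters).reverse := by
  obtain ⟨j, he, hlt, hor⟩ := fbPow_spec 1 n (by omega)
  simp only [Nat.one_mul] at he hlt hor
  rcases hor with h0 | hle
  · subst h0
    simp only [pow_zero] at he hlt
    have hn : n = 0 := by omega
    subst hn
    rw [he, fbEmit, fbLoopA]
    simp
  · have hj : j ≠ 0 := by
      rintro rfl
      simp at hlt
      simp [hlt] at hle
    obtain ⟨k, rfl⟩ := Nat.exists_eq_succ_of_ne_zero hj
    rw [he, fbEmit_digits]
    rw [fbLoopA_digits k letters n (by simpa using hle) hlt]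

-- ===== VERDICT (by name: the statement is the Claim_ definition above) =====
theorem format_base_spec : Claim_equal_format_base := by
  intro value base digit_letters _ _
  unfold Spec_format_base format_base format_base_alt
  simp only []
  rw [core_eq]
  by_cases hneg : value < 0
  · simp only [if_pos hneg, List.reverse_append, List.reverse_cons, List.reverse_nil,
      List.nil_append, List.singleton_append]
    rw [ofList_dash]
  · simp [hneg]
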